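-- pv_equiv track=rewrite | github.com/djb258/barton-outreach-core | .archive/outreach_core/validation/company_validator.py | detect_name_industry_mismatch
-- ===== SOURCE A (Python) =====
-- from typing import Dict, List, Tuple, Optional
--
-- EDUCATION_INDUSTRIES = {'Education', 'Higher Education', 'E-Learning', 'Primary/Secondary Education'}
--
-- NONPROFIT_INDUSTRIES = {'Nonprofit Organization Management', 'Philanthropy', 'Religious Institutions', 'Civic & Social Organization'}
--
-- def detect_name_industry_mismatch(company_name: str, industry: str) -> Optional[str]:
--     """
--     Detect contradictions between company name and industry.
--
--     Returns: error_message if mismatch detected, None otherwise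
--     """
--     name_str = str(company_name).lower()
--     industry_str = str(industry).strip()
--
--     # Educational institutions
--     edu_keywords = ['school', 'university', 'college', 'academy', 'institute']
--     if any(keyword in name_str for keyword in edu_keywords):
--         if industry_str not in EDUCATION_INDUSTRIES:
--             return f"name_suggests_education_but_industry_{industry_str.replace(' ', '_')}"
--
--     # Religious institutions
--     religious_keywords = ['church', 'temple', 'mosque', 'synagogue', 'ministry']
--     if any(keyword in name_str for keyword in religious_keywords):
--         if industry_str not in NONPROFIT_INDUSTRIES and industry_str not in EDUCATION_INDUSTRIES:
--             return f"name_suggests_religious_but_industry_{industry_str.replace(' ', '_')}"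
--
--     return None
-- ===== SOURCE B (Python) =====
-- EDUCATION_INDUSTRIES = {'Education', 'Higher Education', 'E-Learning', 'Primary/Secondary Education'}
--
-- NONPROFIT_INDUSTRIES = {'Nonprofit Organization Management', 'Philanthropy', 'Religious Institutions', 'Civic & Social Organization'}
--
-- # keyword -> suggested category, flat multi-pattern table
-- _KEYWORD_LABELS = [
--     ('school', 'education'), ('university', 'education'), ('college', 'education'),
--     ('academy', 'education'), ('institute', 'education'),
--     ('church', 'religious'), ('temple', 'religious'), ('mosque', 'religious'),
--     ('synagogue', 'religious'), ('ministry', 'religious'),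
-- ]
--
-- def detect_name_industry_mismatch(company_name: str, industry: str):
--     name_str = str(company_name).lower()
--     industry_str = str(industry).strip()
--     # single left-to-right scan of the name: at each position record every
--     # category whose keyword starts there
--     found = set()
--     for i in range(len(name_str)):
--         for kw, label in _KEYWORD_LABELS:
--             if name_str.startswith(kw, i):
--                 found.add(label)
--     # decision table, education checked first
--     for label, allowed in (('education', EDUCATION_INDUSTRIES),
--                            ('religious', NONPROFIT_INDUSTRIES | EDUCATION_INDUSTRIES)):
--         if label in found and industry_str not in allowed:
--             return f"name_suggests_{label}_but_industry_{industry_str.replace(' ', '_')}"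
--     return None
-- ===== Notes on version B (the rewrite author's own statement) =====
-- stated objective: alternative
-- what changed: Replaces A's two per-category any-keyword-substring branches by a single left-to-right scan over the name's character positions that collects the set of suggested categories from a flat keyword->label table (startswith at each position), followed by a decision table checked education-first.
import Mathlib
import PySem

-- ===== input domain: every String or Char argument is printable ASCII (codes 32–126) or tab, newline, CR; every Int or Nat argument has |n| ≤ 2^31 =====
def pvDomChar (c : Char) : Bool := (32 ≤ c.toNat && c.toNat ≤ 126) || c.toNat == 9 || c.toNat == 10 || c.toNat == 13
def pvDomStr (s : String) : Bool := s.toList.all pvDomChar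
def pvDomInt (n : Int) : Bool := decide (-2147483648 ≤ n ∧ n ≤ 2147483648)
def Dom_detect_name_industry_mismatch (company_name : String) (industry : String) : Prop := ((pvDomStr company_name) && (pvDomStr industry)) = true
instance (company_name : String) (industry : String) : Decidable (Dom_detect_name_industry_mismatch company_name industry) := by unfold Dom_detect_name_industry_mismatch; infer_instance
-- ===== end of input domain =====

-- B replaces A's two per-category substring branches by one left-to-right scan of the
-- name collecting suggested categories from a flat keyword table, then a decision table
-- (alternative decomposition, same cost).

def pvEDU : PySem.Set String := PySem.Set.ofList ["Education", "Higher Education", "E-Learning", "Primary/Secondary Education"]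
def pvNON : PySem.Set String := PySem.Set.ofList ["Nonprofit Organization Management", "Philanthropy", "Religious Institutions", "Civic & Social Organization"]

-- ===== PORT A =====
def detect_name_industry_mismatch (company_name : String) (industry : String) : Option String :=
  let name_str := PySem.Str.lower company_name
  let industry_str := PySem.Str.strip industry
  if (["school", "university", "college", "academy", "institute"].any fun k => PySem.Str.isIn k name_str) &&
      !(pvEDU.contains industry_str) then
    some ("name_suggests_education_but_industry_" ++ PySem.Str.replace industry_str " " "_")
  else if (["church", "temple", "mosque", "synagogue", "ministry"].any fun k => PySem.Str.isIn k name_str) &&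
      !(pvNON.contains industry_str) && !(pvEDU.contains industry_str) then
    some ("name_suggests_religious_but_industry_" ++ PySem.Str.replace industry_str " " "_")
  else none

-- ===== PORT B =====
def pvKW : List (String × String) :=
  [("school", "education"), ("university", "education"), ("college", "education"),
   ("academy", "education"), ("institute", "education"),
   ("church", "religious"), ("temple", "religious"), ("mosque", "religious"),
   ("synagogue", "religious"), ("ministry", "religious")]

-- the `for i in range(len(name))` loop: recursion over the suffixes of the name;
-- `name_str.startswith(kw, i)` is `startswith` of the current suffix
def pvScan : List Char → PySem.Set String → PySem.Set String
  | [], found => found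
  | c :: rest, found =>
      pvScan rest
        (pvKW.foldl
          (fun acc p => if PySem.Chars.startswith (c :: rest) p.1.toList then acc.add p.2 else acc)
          found)

-- the decision loop over (label, allowed) pairs
def pvDecide (found : PySem.Set String) (industry_str : String) :
    List (String × PySem.Set String) → Option String
  | [] => none
  | (label, allowed) :: rest =>
    if found.contains label && !(allowed.contains industry_str) then
      some ("name_suggests_" ++ label ++ "_but_industry_" ++ PySem.Str.replace industry_str " " "_")
    else pvDecide found industry_str rest

def detect_name_industry_mismatch_alt (company_name : String) (industry : String) : Option String :=
  let name_str := PySem.Str.lower company_name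
  let industry_str := PySem.Str.strip industry
  let found := pvScan name_str.toList PySem.Set.empty
  pvDecide found industry_str
    [("education", pvEDU), ("religious", PySem.Set.union pvNON pvEDU)]

-- ===== PRECONDITION & SPEC =====
def Spec_detect_name_industry_mismatch (company_name : String) (industry : String) (out : Option String) : Prop := out = detect_name_industry_mismatch_alt company_name industry
instance (company_name : String) (industry : String) (out : Option String) : Decidable (Spec_detect_name_industry_mismatch company_name industry out) := by unfold Spec_detect_name_industry_mismatch; infer_instance

-- ===== CLAIM =====
def Claim_equal_detect_name_industry_mismatch : Prop := ∀ (company_name : String) (industry : String), Dom_detect_name_industry_mismatch company_name industry → Spec_detect_name_industry_mismatch company_name industry (detect_name_industry_mismatch company_name industry)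

-- ===== LEMMAS AND PROOFS =====
theorem pv_fold_mem (l : List (String × String)) (found : PySem.Set String)
    (cond : String × String → Bool) (x : String) :
    x ∈ (l.foldl (fun acc p => if cond p then acc.add p.2 else acc) found)
      ↔ x ∈ found ∨ ∃ p ∈ l, cond p = true ∧ p.2 = x := by
  induction l generalizing found with
  | nil => simp
  | cons p rest ih =>
    by_cases h : cond p = true
    · simp [h, ih, PySem.Set.mem_add]
      tauto
    · simp [Bool.eq_false_iff.mpr h, ih]

theorem pv_scan_mem (t : List Char) (found : PySem.Set String) (x : String) :
    x ∈ pvScan t found ↔ x ∈ found ∨ ∃ p ∈ pvKW, p.1.toList <:+: t ∧ p.2 = x := by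
  induction t generalizing found with
  | nil =>
    have hne : ∀ p ∈ pvKW, p.1.toList ≠ ([] : List Char) := by decide
    simp only [pvScan]
    constructor
    · exact fun h => Or.inl h
    · rintro (h | ⟨p, hp, hinf, _⟩)
      · exact h
      · exact absurd (List.infix_nil.mp hinf) (hne p hp)
  | cons c rest ih =>
    simp only [pvScan]
    rw [ih, pv_fold_mem]
    simp only [PySem.Chars.startswith_iff, List.infix_cons_iff, or_and_right, or_assoc]
    constructor
    · rintro (h | ⟨p, hp, h1, h2⟩ | ⟨p, hp, h1, h2⟩)
      · exact Or.inl h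
      · exact Or.inr ⟨p, hp, Or.inl ⟨h1, h2⟩⟩
      · exact Or.inr ⟨p, hp, Or.inr ⟨h1, h2⟩⟩
    · rintro (h | ⟨p, hp, ⟨h1, h2⟩ | ⟨h1, h2⟩⟩)
      · exact Or.inl h
      · exact Or.inr (Or.inl ⟨p, hp, h1, h2⟩)
      · exact Or.inr (Or.inr ⟨p, hp, h1, h2⟩)

theorem pv_scan_edu (t : List Char) :
    ("education" ∈ pvScan t ([] : PySem.Set String))
      ↔ (PySem.Chars.isIn ['s', 'c', 'h', 'o', 'o', 'l'] t = true ∨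
          PySem.Chars.isIn ['u', 'n', 'i', 'v', 'e', 'r', 's', 'i', 't', 'y'] t = true ∨
            PySem.Chars.isIn ['c', 'o', 'l', 'l', 'e', 'g', 'e'] t = true ∨
              PySem.Chars.isIn ['a', 'c', 'a', 'd', 'e', 'm', 'y'] t = true ∨
                PySem.Chars.isIn ['i', 'n', 's', 't', 'i', 't', 'u', 't', 'e'] t = true) := by
  rw [pv_scan_mem]
  simp [pvKW, PySem.Chars.isIn_iff_infix]

theorem pv_scan_rel (t : List Char) :
    ("religious" ∈ pvScan t ([] : PySem.Set String))
      ↔ (PySem.Chars.isIn ['c', 'h', 'u', 'r', 'c', 'h'] t = true ∨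
          PySem.Chars.isIn ['t', 'e', 'm', 'p', 'l', 'e'] t = true ∨
            PySem.Chars.isIn ['m', 'o', 's', 'q', 'u', 'e'] t = true ∨
              PySem.Chars.isIn ['s', 'y', 'n', 'a', 'g', 'o', 'g', 'u', 'e'] t = true ∨
                PySem.Chars.isIn ['m', 'i', 'n', 'i', 's', 't', 'r', 'y'] t = true) := by
  rw [pv_scan_mem]
  simp [pvKW, PySem.Chars.isIn_iff_infix]

theorem pvUnion_eq_append : PySem.Set.union pvNON pvEDU = (pvNON ++ pvEDU : List String) := by decide

theorem pvMsg_edu (x : String) :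
    "name_suggests_" ++ "education" ++ "_but_industry_" ++ x =
      "name_suggests_education_but_industry_" ++ x := by congr 1

theorem pvMsg_rel (x : String) :
    "name_suggests_" ++ "religious" ++ "_but_industry_" ++ x =
      "name_suggests_religious_but_industry_" ++ x := by congr 1

-- ===== VERDICT =====
theorem detect_name_industry_mismatch_spec : Claim_equal_detect_name_industry_mismatch := by
  intro cn ind _
  unfold Spec_detect_name_industry_mismatch detect_name_industry_mismatch detect_name_industry_mismatch_alt
  simp only [pvDecide, pvUnion_eq_append, PySem.Set.contains_eq_listContains,
    List.contains_append, Bool.not_or, pvMsg_edu, pvMsg_rel]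
  simp only [List.any_cons, List.any_nil, PySem.Str.isIn_eq, PySem.Str.toList_lower]
  simp [pv_scan_edu, pv_scan_rel, and_assoc]
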